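-- pv_equiv track=rewrite | github.com/sklprogs/unmusic | src/tests.py | _is_word_camel
-- ===== SOURCE A (Python) =====
-- def _is_word_camel(word):
--     ''' - There can be false-positive results if each track has
--           a translation (e.g., looks like "a title in a foreign
--           language (a translated title)"). Moreover, '_' or '-' are
--           not considered as punctuation. To be on a safe side, we
--           remove all non-alphabetic symbols here - this actually
--           should not be slower than adding extra punctuation and
--           then removing it together with digits.
--         - NOTE: Do this when processing words, not tracks, since
--           spaces will be deleted otherwise!
--     '''
--     word = [char for char in word if char.isalpha()]
--     word = ''.join(word)
--     if word == word.upper():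
--         return
--     ''' The word may be shortened by the first symbol only here
--         since we are sure now that only letters have left.
--     '''
--     for char in word[1:]:
--         # This already checks if a letter is provided
--         if char.isupper():
--             return True
-- ===== SOURCE B (Python) =====
-- def _is_word_camel(word):
--     not_all_upper = False
--     upper_after_first = False
--     idx = 0
--     for char in word:
--         if not char.isalpha():
--             continue
--         if char != char.upper():
--             not_all_upper = True
--         if idx > 0 and char.isupper():
--             upper_after_first = True
--         idx += 1
--     if not_all_upper and upper_after_first:
--         return True
-- ===== Notes on version B (the rewrite author's own statement) =====
-- stated objective: simpler
-- what changed: B replaces A's filter-join-compare-then-rescan pipeline (building a filtered string, comparing it with its uppercase copy, then scanning its tail) with a single pass over the original word maintaining two flags and a letter counter.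
import Mathlib
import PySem

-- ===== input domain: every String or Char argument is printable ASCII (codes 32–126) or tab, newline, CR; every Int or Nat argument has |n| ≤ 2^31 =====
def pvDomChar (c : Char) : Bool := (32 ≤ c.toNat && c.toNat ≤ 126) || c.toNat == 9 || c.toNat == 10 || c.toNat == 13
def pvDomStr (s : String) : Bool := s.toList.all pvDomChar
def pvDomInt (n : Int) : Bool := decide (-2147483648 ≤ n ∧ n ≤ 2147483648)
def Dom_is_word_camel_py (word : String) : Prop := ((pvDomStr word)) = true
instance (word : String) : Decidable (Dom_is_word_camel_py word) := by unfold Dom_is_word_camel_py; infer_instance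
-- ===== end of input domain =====

-- B changes the decomposition only (single pass with flags instead of filter/join/compare/rescan); no speed claim.

-- ===== PORT A =====
-- 'for char in word[1:]: if char.isupper(): return True' (implicit None at the end)
def pvCamelScanA : List Char → Option Bool
  | [] => none
  | c :: rest => if PySem.Chars.isupper c then some true else pvCamelScanA rest

def is_word_camel_py (word : String) : Option Bool :=
  -- word = ''.join([char for char in word if char.isalpha()])
  let w := word.toList.filter (fun c => PySem.Chars.isalpha c)
  -- if word == word.upper(): return
  if w = PySem.Chars.upper w then none
  else pvCamelScanA (PySem.List.slice w (some 1) none)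

-- ===== PORT B =====
-- one pass: state = (not_all_upper, upper_after_first, idx)
def pvCamelStepB (st : Bool × Bool × Nat) (c : Char) : Bool × Bool × Nat :=
  if !PySem.Chars.isalpha c then st
  else
    (st.1 || (c != PySem.Chars.upperChar c),
     st.2.1 || (decide (0 < st.2.2) && PySem.Chars.isupper c),
     st.2.2 + 1)

def is_word_camel_py_alt (word : String) : Option Bool :=
  let s := word.toList.foldl pvCamelStepB (false, false, 0)
  if s.1 && s.2.1 then some true else none

-- ===== PRECONDITION & SPEC =====
def Spec_is_word_camel_py (word : String) (out : Option Bool) : Prop := out = is_word_camel_py_alt word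
instance (word : String) (out : Option Bool) : Decidable (Spec_is_word_camel_py word out) := by unfold Spec_is_word_camel_py; infer_instance

-- ===== CLAIM (what is proved, stated in full; the proofs are below) =====
def Claim_equal_is_word_camel_py : Prop := ∀ (word : String), Dom_is_word_camel_py word → Spec_is_word_camel_py word (is_word_camel_py word)

-- ===== LEMMAS AND PROOFS =====

lemma pvCamelScanA_eq_any (l : List Char) :
    pvCamelScanA l = (if l.any PySem.Chars.isupper then some true else none) := by
  induction l with
  | nil => simp [pvCamelScanA]
  | cons c rest ih =>
    by_cases h : PySem.Chars.isupper c = true <;> simp [pvCamelScanA, h, ih]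

lemma pvCamelFold_pos (l : List Char) (nau uaf : Bool) (idx : Nat) (h : 0 < idx) :
    l.foldl pvCamelStepB (nau, uaf, idx) =
      (nau || (l.filter (fun c => PySem.Chars.isalpha c)).any (fun c => c != PySem.Chars.upperChar c),
       uaf || (l.filter (fun c => PySem.Chars.isalpha c)).any PySem.Chars.isupper,
       idx + (l.filter (fun c => PySem.Chars.isalpha c)).length) := by
  induction l generalizing nau uaf idx with
  | nil => simp
  | cons c rest ih =>
    by_cases ha : PySem.Chars.isalpha c = true
    · rw [List.foldl_cons,
        show pvCamelStepB (nau, uaf, idx) c =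
          (nau || (c != PySem.Chars.upperChar c), uaf || (decide (0 < idx) && PySem.Chars.isupper c), idx + 1)
          from by simp [pvCamelStepB, ha],
        ih _ _ _ (by omega)]
      simp [ha, h, Bool.or_assoc]
      omega
    · rw [List.foldl_cons,
        show pvCamelStepB (nau, uaf, idx) c = (nau, uaf, idx) from by simp [pvCamelStepB, ha],
        ih _ _ _ h]
      simp [ha]

lemma pvCamelFold_zero (l : List Char) :
    l.foldl pvCamelStepB (false, false, 0) =
      ((l.filter (fun c => PySem.Chars.isalpha c)).any (fun c => c != PySem.Chars.upperChar c),
       ((l.filter (fun c => PySem.Chars.isalpha c)).drop 1).any PySem.Chars.isupper,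
       (l.filter (fun c => PySem.Chars.isalpha c)).length) := by
  induction l with
  | nil => simp
  | cons c rest ih =>
    by_cases ha : PySem.Chars.isalpha c = true
    · rw [List.foldl_cons,
        show pvCamelStepB (false, false, 0) c = ((c != PySem.Chars.upperChar c), false, 1)
          from by simp [pvCamelStepB, ha],
        pvCamelFold_pos _ _ _ _ (by omega)]
      simp [ha]
      omega
    · rw [List.foldl_cons,
        show pvCamelStepB (false, false, 0) c = (false, false, 0) from by simp [pvCamelStepB, ha],
        ih]
      simp [ha]

lemma pvCamelUpperEq (l : List Char) :
    (l = PySem.Chars.upper l) ↔ (l.any (fun c => c != PySem.Chars.upperChar c) = false) := by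
  induction l with
  | nil => simp [PySem.Chars.upper]
  | cons c rest ih =>
    simp only [PySem.Chars.upper, List.map_cons, List.any_cons, Bool.or_eq_false_iff,
      List.cons.injEq, bne_eq_false_iff_eq] at *
    constructor
    · rintro ⟨h1, h2⟩; exact ⟨h1, ih.mp h2⟩
    · rintro ⟨h1, h2⟩; exact ⟨h1, ih.mpr h2⟩

-- ===== VERDICT (by name: the statement is the Claim_ definition above) =====
theorem is_word_camel_py_spec : Claim_equal_is_word_camel_py := by
  intro word _
  simp only [Spec_is_word_camel_py, is_word_camel_py, is_word_camel_py_alt,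
    pvCamelFold_zero, PySem.List.slice_from_one, pvCamelScanA_eq_any]
  set w := word.toList.filter (fun c => PySem.Chars.isalpha c) with hw
  by_cases h : w = PySem.Chars.upper w
  · have hn : w.any (fun c => c != PySem.Chars.upperChar c) = false := (pvCamelUpperEq w).mp h
    rw [if_pos h]; simp [hn]
  · have hn : w.any (fun c => c != PySem.Chars.upperChar c) = true := by
      cases e : w.any (fun c => c != PySem.Chars.upperChar c)
      · exact absurd ((pvCamelUpperEq w).mpr e) h
      · rfl
    rw [if_neg h]; simp [hn, List.drop_one]
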